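-- pv_equiv track=rewrite | github.com/GustavoSantosBr/coursera-python | SecondPart/Week6/PrintElephants.py | elephants
-- ===== SOURCE A (Python) =====
-- def bother(repetitions: int) -> str:
--     message = ""
--
--     if repetitions <= 0:
--         return message
--
--     message += "incomodam "
--     return message + bother(repetitions - 1)
--
-- def elephants(repetitions: int, repetition_limit: int or None = None) -> str:
--     if not repetition_limit:
--         repetition_limit, repetitions = repetitions, 2
--
--     if repetitions > repetition_limit:
--         return ""
--
--     end_of_message = f"{repetitions} elefantes {bother(repetitions)}muito mais\n"
--
--     if repetitions < repetition_limit: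
--         end_of_message += f"{repetitions} elefantes incomodam muita gente\n"
--
--     if repetitions == 2:
--         message = "Um elefante incomoda muita gente\n"
--         message += end_of_message
--         return message + elephants(repetitions + 1, repetition_limit)
--
--     message = end_of_message
--     return message + elephants(repetitions + 1, repetition_limit)
-- ===== SOURCE B (Python) =====
-- def elephants(repetitions: int, repetition_limit: int or None = None) -> str:
--     if not repetition_limit:
--         repetition_limit, repetitions = repetitions, 2
--     parts = []
--     for r in range(repetitions, repetition_limit + 1):
--         if r == 2:
--             parts.append("Um elefante incomoda muita gente\n")
--         parts.append(f"{r} elefantes " + "incomodam " * r + "muito mais\n")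
--         if r < repetition_limit:
--             parts.append(f"{r} elefantes incomodam muita gente\n")
--     return "".join(parts)
-- ===== Notes on version B (the rewrite author's own statement) =====
-- stated objective: simpler
-- what changed: Replaced A's two recursions (elephants over the range, bother over the count) by a single explicit loop over range(start, limit+1) that appends each verse's lines (string multiplication for 'incomodam ') to a list joined at the end.
import Mathlib
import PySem

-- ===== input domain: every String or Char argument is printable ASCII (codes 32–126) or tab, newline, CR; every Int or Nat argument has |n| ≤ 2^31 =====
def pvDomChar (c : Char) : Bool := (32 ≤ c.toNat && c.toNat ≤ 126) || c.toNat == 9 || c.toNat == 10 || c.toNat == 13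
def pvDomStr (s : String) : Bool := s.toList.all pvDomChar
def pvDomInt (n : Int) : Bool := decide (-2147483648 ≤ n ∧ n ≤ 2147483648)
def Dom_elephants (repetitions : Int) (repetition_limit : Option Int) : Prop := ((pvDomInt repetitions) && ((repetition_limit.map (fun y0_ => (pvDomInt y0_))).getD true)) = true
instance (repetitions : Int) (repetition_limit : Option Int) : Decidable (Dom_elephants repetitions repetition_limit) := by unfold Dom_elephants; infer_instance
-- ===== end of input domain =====

-- B replaces A's two recursions by one loop over range(start, limit+1) with string
-- multiplication and ''.join — objective: simpler (one explicit pass, no recursion).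

-- ===== PORT A =====
-- bother(repetitions): recursion on repetitions
def botherA (repetitions : Int) : String :=
  if repetitions ≤ 0 then ""
  else "incomodam " ++ botherA (repetitions - 1)
termination_by repetitions.toNat
decreasing_by omega

-- the recursive body of elephants after the falsiness normalization; the recursive
-- calls always pass the already-normalized integer limit (when that limit is 0 the
-- body returns before recursing, so the `if not repetition_limit` re-check of the
-- Python never re-fires inside the recursion), so the limit is a fixed parameter here
def elephantsGo (repetitions : Int) (limit : Int) : String :=
  if repetitions > limit then ""
  else
    let end_of_message := PySem.Int.toStr repetitions ++ " elefantes " ++ botherA repetitions ++ "muito mais\n"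
    let end_of_message := if repetitions < limit then end_of_message ++ (PySem.Int.toStr repetitions ++ " elefantes incomodam muita gente\n") else end_of_message
    if repetitions = 2 then
      ("Um elefante incomoda muita gente\n" ++ end_of_message) ++ elephantsGo (repetitions + 1) limit
    else
      end_of_message ++ elephantsGo (repetitions + 1) limit
termination_by (limit + 1 - repetitions).toNat
decreasing_by all_goals omega

def elephants (repetitions : Int) (repetition_limit : Option Int) : String :=
  -- `if not repetition_limit:` — None and 0 are both falsy
  let norm : Int × Int :=
    match repetition_limit with
    | none => (repetitions, 2)
    | some l => if l = 0 then (repetitions, 2) else (l, repetitions)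
  elephantsGo norm.2 norm.1

-- ===== PORT B =====
def elephants_alt (repetitions : Int) (repetition_limit : Option Int) : String :=
  let norm : Int × Int :=
    match repetition_limit with
    | none => (repetitions, 2)
    | some l => if l = 0 then (repetitions, 2) else (l, repetitions)
  let limit := norm.1
  let parts : List String :=
    (PySem.List.pyRange norm.2 (limit + 1) 1).foldl (fun acc r =>
      let acc := if r = 2 then acc ++ ["Um elefante incomoda muita gente\n"] else acc
      -- "incomodam " * r : String.join (List.replicate r.toNat _) is exact (negative r → "")
      let acc := acc ++ [PySem.Int.toStr r ++ " elefantes " ++ String.join (List.replicate r.toNat "incomodam ") ++ "muito mais\n"]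
      if r < limit then acc ++ [PySem.Int.toStr r ++ " elefantes incomodam muita gente\n"] else acc) []
  -- ''.join(parts) is plain concatenation
  String.join parts

-- ===== PRECONDITION & SPEC =====
-- Pre_ excludes exactly the inputs on which A's recursion overflows the interpreter's
-- recursion limit and raises RecursionError: the peak call depth is about
-- 2*limit - start (elephants frames plus the bother chain), and the bound 9950 is the
-- interpreter's limit of 10000 minus a small margin for the caller's own stack frames.
def Pre_elephants (repetitions : Int) (repetition_limit : Option Int) : Prop :=
  let L : Int := match repetition_limit with | none => repetitions | some l => if l = 0 then repetitions else l
  let s : Int := match repetition_limit with | none => 2 | some l => if l = 0 then 2 else repetitions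
  L < s ∨ 2 * L - s ≤ 9950
instance (repetitions : Int) (repetition_limit : Option Int) : Decidable (Pre_elephants repetitions repetition_limit) := by unfold Pre_elephants; infer_instance
def pvWitness_elephants : Int × Option Int := (1, some 4)

def Spec_elephants (repetitions : Int) (repetition_limit : Option Int) (out : String) : Prop := out = elephants_alt repetitions repetition_limit
instance (repetitions : Int) (repetition_limit : Option Int) (out : String) : Decidable (Spec_elephants repetitions repetition_limit out) := by unfold Spec_elephants; infer_instance

-- ===== CLAIM (what is proved, stated in full; the proofs are below) =====
def Claim_equal_elephants : Prop := ∀ (repetitions : Int) (repetition_limit : Option Int), Dom_elephants repetitions repetition_limit → Pre_elephants repetitions repetition_limit → Spec_elephants repetitions repetition_limit (elephants repetitions repetition_limit)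

-- ===== LEMMAS AND PROOFS =====

theorem foldl_append_str (l : List String) : ∀ a : String, l.foldl (fun r s => r ++ s) a = a ++ String.join l := by
  induction l with
  | nil => intro a; simp [String.join]
  | cons y ys ih =>
      intro a
      calc (y :: ys).foldl (fun r s => r ++ s) a = ys.foldl (fun r s => r ++ s) (a ++ y) := rfl
        _ = (a ++ y) ++ String.join ys := ih (a ++ y)
        _ = a ++ (y ++ String.join ys) := String.append_assoc
        _ = a ++ ys.foldl (fun r s => r ++ s) y := by rw [ih y]
        _ = a ++ String.join (y :: ys) := by simp only [String.join, List.foldl_cons, String.empty_append]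

theorem join_cons (x : String) (l : List String) : String.join (x :: l) = x ++ String.join l := by
  simp only [String.join, List.foldl_cons, String.empty_append]
  exact foldl_append_str l x

theorem join_append (a b : List String) : String.join (a ++ b) = String.join a ++ String.join b := by
  induction a with
  | nil => simp [String.join, String.empty_append]
  | cons x xs ih => simp only [List.cons_append, join_cons, ih, String.append_assoc]

theorem bother_eq (n : Int) : botherA n = String.join (List.replicate n.toNat "incomodam ") := by
  by_cases h : n ≤ 0
  · have h0 : n.toNat = 0 := by omega
    rw [botherA]
    simp [h, h0, String.join]
  · have h1 : n.toNat = (n - 1).toNat + 1 := by omega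
    rw [botherA]
    simp only [h, if_false]
    rw [h1, List.replicate_succ, join_cons, bother_eq (n - 1)]
termination_by n.toNat
decreasing_by omega

-- the per-r group of lines B appends
def gLines (r limit : Int) : List String :=
  (if r = 2 then ["Um elefante incomoda muita gente\n"] else [])
  ++ [PySem.Int.toStr r ++ " elefantes " ++ String.join (List.replicate r.toNat "incomodam ") ++ "muito mais\n"]
  ++ (if r < limit then [PySem.Int.toStr r ++ " elefantes incomodam muita gente\n"] else [])

theorem fold_eq (limit : Int) (l : List Int) (acc : List String) :
    l.foldl (fun acc r =>
      let acc := if r = 2 then acc ++ ["Um elefante incomoda muita gente\n"] else acc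
      let acc := acc ++ [PySem.Int.toStr r ++ " elefantes " ++ String.join (List.replicate r.toNat "incomodam ") ++ "muito mais\n"]
      if r < limit then acc ++ [PySem.Int.toStr r ++ " elefantes incomodam muita gente\n"] else acc) acc
    = acc ++ l.flatMap (fun r => gLines r limit) := by
  induction l generalizing acc with
  | nil => simp
  | cons r rs ih =>
      simp only [List.foldl_cons, List.flatMap_cons, ih, ← List.append_assoc]
      congr 1
      by_cases h2 : r = 2
      · subst h2
        by_cases h3 : (2 : Int) < limit <;> simp [gLines, h3]
      · by_cases h3 : r < limit <;> simp [gLines, h2, h3]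

theorem go_eq (s L : Int) :
    elephantsGo s L = String.join ((PySem.List.pyRange s (L + 1) 1).flatMap (fun r => gLines r L)) := by
  by_cases h : s > L
  · rw [elephantsGo]
    rw [PySem.List.pyRange_one_eq_nil (by omega)]
    simp [h, String.join]
  · rw [elephantsGo]
    rw [PySem.List.pyRange_one_cons (show s < L + 1 by omega)]
    rw [List.flatMap_cons, join_append, ← go_eq (s + 1) L]
    simp only [h, if_false]
    by_cases h2 : s = 2
    · subst h2
      by_cases h3 : (2 : Int) < L <;>
        simp [gLines, h3, bother_eq, String.join, String.append_assoc]
    · by_cases h3 : s < L <;>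
        simp [gLines, h2, h3, bother_eq, String.join, String.append_assoc]
termination_by (L + 1 - s).toNat
decreasing_by omega

-- ===== VERDICT (by name: the statement is the Claim_ definition above) =====
theorem elephants_spec : Claim_equal_elephants := by
  intro repetitions repetition_limit _dom _pre
  show elephants repetitions repetition_limit = elephants_alt repetitions repetition_limit
  unfold elephants elephants_alt
  cases repetition_limit with
  | none =>
      dsimp only
      rw [go_eq, fold_eq]
      simp
  | some l =>
      by_cases hl : l = 0 <;>
        · dsimp only
          simp only [hl, if_true, if_false]
          rw [go_eq, fold_eq]
          simp
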